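-- pv_equiv track=rewrite | github.com/k1ngr4m/LetouMe | backend/app/services/expert_prediction_service.py | _calculate_max_omit
-- ===== SOURCE A (Python) =====
-- def _calculate_max_omit(seq: list[int]) -> int:
--     current = 0
--     maximum = 0
--     for value in seq:
--         if value == 1:
--             maximum = max(maximum, current)
--             current = 0
--         else:
--             current += 1
--     maximum = max(maximum, current)
--     return maximum
-- ===== SOURCE B (Python) =====
-- def _calculate_max_omit(seq: list[int]) -> int:
--     # One explicit grouping pass into (key, run-length) groups, then a max-reduction
--     # over the lengths of the non-1 groups (default 0).
--     groups = []
--     for v in seq: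
--         k = (v == 1)
--         if groups and groups[-1][0] == k:
--             groups[-1] = (k, groups[-1][1] + 1)
--         else:
--             groups.append((k, 1))
--     return max((n for k, n in groups if not k), default=0)
-- ===== Notes on version B (the rewrite author's own statement) =====
-- stated objective: alternative
-- what changed: B replaces A's running current/maximum accumulator with an explicit grouping pass that builds maximal (is-one, run-length) groups and then takes the max of the non-1 group lengths with default 0.
import Mathlib
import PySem

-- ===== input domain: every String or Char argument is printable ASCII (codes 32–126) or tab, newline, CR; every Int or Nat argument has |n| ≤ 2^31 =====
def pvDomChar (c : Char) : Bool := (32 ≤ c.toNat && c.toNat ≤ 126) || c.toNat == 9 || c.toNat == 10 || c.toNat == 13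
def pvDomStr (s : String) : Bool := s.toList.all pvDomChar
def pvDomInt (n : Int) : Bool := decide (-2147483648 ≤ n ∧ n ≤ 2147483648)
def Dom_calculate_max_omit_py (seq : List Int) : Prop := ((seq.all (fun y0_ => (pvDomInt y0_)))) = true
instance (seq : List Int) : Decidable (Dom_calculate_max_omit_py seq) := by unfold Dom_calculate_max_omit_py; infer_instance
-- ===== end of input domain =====

-- B replaces A's running current/maximum accumulator with an explicit grouping pass
-- (maximal (is-one, run-length) groups) followed by a max-reduction over non-1 group lengths.


-- ===== PORT A =====
-- A's loop state is (current, maximum)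
def pvStepA (st : Int × Int) (v : Int) : Int × Int :=
  if v = 1 then (0, max st.2 st.1) else (st.1 + 1, st.2)

def calculate_max_omit_py (seq : List Int) : Int :=
  let st := seq.foldl pvStepA (0, 0)
  max st.2 st.1

-- ===== PORT B =====
-- grouping pass; the accumulator holds the groups newest-first (Python appends at the end)
def pvStepGroup (acc : List (Bool × Int)) (v : Int) : List (Bool × Int) :=
  let k : Bool := v == 1
  match acc with
  | (k', n) :: rest => if k' == k then (k, n + 1) :: rest else (k, 1) :: (k', n) :: rest
  | [] => [(k, 1)]

def calculate_max_omit_py_alt (seq : List Int) : Int :=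
  let groups := (seq.foldl pvStepGroup []).reverse
  ((groups.filter (fun p => !p.1)).map Prod.snd).foldl max 0

-- ===== PRECONDITION & SPEC =====
def Spec_calculate_max_omit_py (seq : List Int) (out : Int) : Prop := out = calculate_max_omit_py_alt seq
instance (seq : List Int) (out : Int) : Decidable (Spec_calculate_max_omit_py seq out) := by unfold Spec_calculate_max_omit_py; infer_instance

-- ===== CLAIM (what is proved, stated in full; the proofs are below) =====
def Claim_equal_calculate_max_omit_py : Prop := ∀ (seq : List Int), Dom_calculate_max_omit_py seq → Spec_calculate_max_omit_py seq (calculate_max_omit_py seq)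

-- ===== LEMMAS AND PROOFS =====

-- proof-only helpers: groups built by recursion from the front (oldest-first)
def pvMergeR (k : Bool) (c : Int) (rs : List (Bool × Int)) : List (Bool × Int) :=
  match rs with
  | (k', n) :: rest => if k' == k then (k, c + n) :: rest else (k, c) :: (k', n) :: rest
  | [] => [(k, c)]

def pvRuns : List Int → List (Bool × Int)
  | [] => []
  | x :: t => pvMergeR (x == 1) 1 (pvRuns t)

def pvGMax (gs : List (Bool × Int)) : Int :=
  ((gs.filter (fun p => !p.1)).map Prod.snd).foldl max 0

def pvConsR (c : Int) (rs : List (Bool × Int)) : List (Bool × Int) :=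
  if c = 0 then rs else pvMergeR false c rs

lemma pvMergeMerge (k : Bool) (c : Int) (rs : List (Bool × Int)) :
    pvMergeR k c (pvMergeR k 1 rs) = pvMergeR k (c + 1) rs := by
  cases rs with
  | nil => simp [pvMergeR]
  | cons h t =>
    obtain ⟨k', n⟩ := h
    by_cases hk : k' = k <;> simp [pvMergeR, hk] <;> omega

lemma pvMergePush (k k' : Bool) (c c' : Int) (rs : List (Bool × Int)) (h : ¬ k' = k) :
    pvMergeR k c (pvMergeR k' c' rs) = (k, c) :: pvMergeR k' c' rs := by
  cases rs with
  | nil => simp [pvMergeR, h]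
  | cons hd t =>
    obtain ⟨k'', n⟩ := hd
    by_cases hk : k'' = k' <;> simp [pvMergeR, hk, h]

lemma pvStepGroupCons (k' : Bool) (n : Int) (rest : List (Bool × Int)) (v : Int) :
    pvStepGroup ((k', n) :: rest) v =
      if k' == (v == 1) then ((v == 1), n + 1) :: rest
      else ((v == 1), 1) :: (k', n) :: rest := rfl

lemma pvFoldlGroupCons (t : List Int) : ∀ (k : Bool) (c : Int) (rest : List (Bool × Int)),
    List.foldl pvStepGroup ((k, c) :: rest) t = (pvMergeR k c (pvRuns t)).reverse ++ rest := by
  induction t with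
  | nil => intro k c rest; simp [pvRuns, pvMergeR]
  | cons x t ih =>
    intro k c rest
    rw [List.foldl_cons, pvStepGroupCons]
    by_cases hk : k = (x == 1)
    · rw [if_pos (by simp [hk]), ih, pvRuns, hk, pvMergeMerge]
    · rw [if_neg (by simp [hk]), ih, pvRuns, pvMergePush _ _ _ _ _ (Ne.symm hk)]
      simp

lemma pvFoldlGroupNil (seq : List Int) :
    List.foldl pvStepGroup [] seq = (pvRuns seq).reverse := by
  cases seq with
  | nil => simp [pvRuns]
  | cons x t =>
    have h1 : List.foldl pvStepGroup [] (x :: t)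
        = List.foldl pvStepGroup [((x == 1), 1)] t := by
      simp [List.foldl, pvStepGroup]
    rw [h1, pvFoldlGroupCons t (x == 1) 1 [], pvRuns]
    simp

lemma pvAltEqGMax (seq : List Int) :
    calculate_max_omit_py_alt seq = pvGMax (pvRuns seq) := by
  simp [calculate_max_omit_py_alt, pvGMax, pvFoldlGroupNil]

lemma pvFoldlMaxNonneg (L : List Int) : ∀ a : Int, 0 ≤ a → List.foldl max a L = max a (List.foldl max 0 L) := by
  induction L with
  | nil => intro a ha; simp; omega
  | cons x L ih =>
    intro a ha
    have h1 := ih (max a x) (by omega)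
    have h2 := ih (max 0 x) (by omega)
    simp only [List.foldl] at *
    rw [h1, h2]; omega

lemma pvGMaxNonneg (rs : List (Bool × Int)) : 0 ≤ pvGMax rs := by
  have := pvFoldlMaxNonneg (((rs.filter (fun p => !p.1)).map Prod.snd)) 0 le_rfl
  unfold pvGMax
  omega

lemma pvGMaxConsTrue (n : Int) (rs : List (Bool × Int)) :
    pvGMax ((true, n) :: rs) = pvGMax rs := by
  simp [pvGMax]

lemma pvGMaxConsFalse (c : Int) (rs : List (Bool × Int)) (hc : 0 ≤ c) :
    pvGMax ((false, c) :: rs) = max c (pvGMax rs) := by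
  unfold pvGMax
  rw [List.filter_cons_of_pos (by simp), List.map_cons, List.foldl_cons,
    pvFoldlMaxNonneg _ (max 0 c) (by omega)]
  omega

lemma pvGMaxMergeTrue (rs : List (Bool × Int)) :
    pvGMax (pvMergeR true 1 rs) = pvGMax rs := by
  cases rs with
  | nil => simp [pvMergeR, pvGMax]
  | cons h t =>
    obtain ⟨k', n⟩ := h
    cases k' <;> simp [pvMergeR, pvGMaxConsTrue]

-- fA t c : A's answer when started with current = c, maximum = 0
def pvFA (t : List Int) (c : Int) : Int :=
  let st := t.foldl pvStepA (c, 0)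
  max st.2 st.1

lemma pvStepA_pos (st : Int × Int) (v : Int) (h : v = 1) :
    pvStepA st v = (0, max st.2 st.1) := by simp [pvStepA, h]

lemma pvStepA_neg (st : Int × Int) (v : Int) (h : ¬ v = 1) :
    pvStepA st v = (st.1 + 1, st.2) := by simp [pvStepA, h]

lemma pvMono (t : List Int) : ∀ c m : Int, 0 ≤ c → 0 ≤ m →
    t.foldl pvStepA (c, m) = ((t.foldl pvStepA (c, 0)).1, max m (t.foldl pvStepA (c, 0)).2) := by
  induction t with
  | nil => intro c m _ hm; simp; omega
  | cons v t ih =>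
    intro c m hc hm
    by_cases hv : v = 1
    · rw [List.foldl_cons, List.foldl_cons, pvStepA_pos _ _ hv, pvStepA_pos _ _ hv]
      simp only
      rw [ih 0 (max m c) le_rfl (by omega), ih 0 (max 0 c) le_rfl (by omega)]
      simp only [Prod.mk.injEq]
      exact ⟨trivial, by omega⟩
    · rw [List.foldl_cons, List.foldl_cons, pvStepA_neg _ _ hv, pvStepA_neg _ _ hv]
      simp only
      rw [ih (c + 1) m (by omega) hm, ih (c + 1) 0 (by omega) le_rfl]

lemma pvFA_one (t : List Int) (c : Int) (hc : 0 ≤ c) :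
    pvFA (1 :: t) c = max c (pvFA t 0) := by
  unfold pvFA
  rw [List.foldl_cons, pvStepA_pos _ _ rfl]
  simp only
  rw [pvMono t 0 (max 0 c) le_rfl (by omega)]
  simp only
  omega

lemma pvFA_other (t : List Int) (c v : Int) (hv : ¬ v = 1) :
    pvFA (v :: t) c = pvFA t (c + 1) := by
  unfold pvFA
  rw [List.foldl_cons, pvStepA_neg _ _ hv]

lemma pvMain (t : List Int) : ∀ c : Int, 0 ≤ c → pvFA t c = pvGMax (pvConsR c (pvRuns t)) := by
  induction t with
  | nil =>
    intro c hc
    by_cases h0 : c = 0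
    · simp [pvFA, pvConsR, h0, pvRuns, pvGMax]
    · simp [pvFA, pvConsR, h0, pvRuns, pvMergeR, pvGMax]
  | cons v t ih =>
    intro c hc
    by_cases hv : v = 1
    · subst hv
      rw [pvFA_one t c hc, ih 0 le_rfl]
      have hkey : pvRuns (1 :: t) = pvMergeR true 1 (pvRuns t) := by simp [pvRuns]
      rw [hkey]
      by_cases h0 : c = 0
      · subst h0
        simp only [pvConsR, if_pos]
        rw [pvGMaxMergeTrue]
        have := pvGMaxNonneg (pvRuns t)
        omega
      · have hpush : pvMergeR false c (pvMergeR true 1 (pvRuns t)) =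
            (false, c) :: pvMergeR true 1 (pvRuns t) := pvMergePush _ _ _ _ _ (by decide)
        simp only [pvConsR, if_neg h0, if_pos, hpush]
        rw [pvGMaxConsFalse c _ hc, pvGMaxMergeTrue]
    · rw [pvFA_other t c v hv, ih (c + 1) (by omega)]
      have hb : (v == 1) = false := by simp [hv]
      have hkey : pvRuns (v :: t) = pvMergeR false 1 (pvRuns t) := by
        rw [pvRuns, hb]
      rw [hkey]
      congr 1
      by_cases h0 : c = 0
      · subst h0
        simp [pvConsR, pvMergeR]
      · have h1 : ¬ (c + 1 = 0) := by omega
        simp only [pvConsR, if_neg h0, if_neg h1]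
        exact (pvMergeMerge false c (pvRuns t)).symm

-- ===== VERDICT (by name: the statement is the Claim_ definition above) =====
theorem calculate_max_omit_py_spec : Claim_equal_calculate_max_omit_py := by
  intro seq _
  show calculate_max_omit_py seq = calculate_max_omit_py_alt seq
  rw [pvAltEqGMax]
  have h := pvMain seq 0 le_rfl
  simpa [pvFA, pvConsR, calculate_max_omit_py] using h
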